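-- pv_equiv track=rewrite | github.com/damazz/HQCA | tools/testopt.py | grad_rosen
-- ===== SOURCE A (Python) =====
-- def grad_rosen(p):
--     n = len(p)
--     g = []
--     t = 2*(200*p[0]**3-200*p[0]*p[1]+p[0]-1)
--     g.append(t)
--     for v in range(1,n-1):
--         t = 2*(200*p[v]**3-200*p[v]*p[v+1]+p[v]-1)
--         t+= 200*(p[v]-p[v-1]**2)
--         g.append(t)
--     t= 200*(p[-1]-p[-2]**2)
--     g.append(t)
--     return g
-- ===== SOURCE B (Python) =====
-- def grad_rosen(p):
--     n = len(p)
--     g = [0] * n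
--     for i in range(n - 1):
--         g[i] += 2*(200*p[i]**3 - 200*p[i]*p[i+1] + p[i] - 1)
--         g[i+1] += 200*(p[i+1] - p[i]**2)
--     return g
-- ===== Notes on version B (the rewrite author's own statement) =====
-- stated objective: alternative
-- what changed: B pre-allocates g=[0]*n and scatters each adjacent pair's two gradient contributions (self-term into g[i], coupling into g[i+1]) in a single loop over range(n-1), instead of A's append-based loop that gathers both neighbours' terms per output slot with special-cased first and last entries.
-- crash fix: A raises IndexError whenever len(p) < 2 because it unconditionally indexes p[1] and p[-2]; B's loop is simply empty there and it returns [0]*len(p). — e.g. on grad_rosen([3]): A raises IndexError, B returns [0]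
import Mathlib
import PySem

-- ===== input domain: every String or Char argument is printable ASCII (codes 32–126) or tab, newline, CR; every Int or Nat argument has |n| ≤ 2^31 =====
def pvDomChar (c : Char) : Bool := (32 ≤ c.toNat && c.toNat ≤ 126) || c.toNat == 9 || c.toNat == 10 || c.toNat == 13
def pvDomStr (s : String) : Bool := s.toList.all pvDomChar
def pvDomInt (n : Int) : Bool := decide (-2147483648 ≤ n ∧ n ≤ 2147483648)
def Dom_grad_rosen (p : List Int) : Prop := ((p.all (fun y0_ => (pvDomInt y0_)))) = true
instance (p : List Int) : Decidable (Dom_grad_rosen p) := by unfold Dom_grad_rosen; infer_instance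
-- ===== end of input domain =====

-- B scatters each adjacent pair's two gradient contributions into a pre-allocated [0]*n
-- array in one loop, instead of A's append loop with special-cased first/last entries.


-- ===== PORT A =====
def grad_rosen (p : List Int) : List Int :=
  let n : Int := p.length
  let g : List Int := []
  let t : Int := 2*(200*(PySem.List.pyGetD p 0 0)^3 - 200*(PySem.List.pyGetD p 0 0)*(PySem.List.pyGetD p 1 0) + PySem.List.pyGetD p 0 0 - 1)
  let g := g ++ [t]
  let g := (PySem.List.pyRange 1 (n-1) 1).foldl (fun g v =>
    let t := 2*(200*(PySem.List.pyGetD p v 0)^3 - 200*(PySem.List.pyGetD p v 0)*(PySem.List.pyGetD p (v+1) 0) + PySem.List.pyGetD p v 0 - 1)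
    let t := t + 200*(PySem.List.pyGetD p v 0 - (PySem.List.pyGetD p (v-1) 0)^2)
    g ++ [t]) g
  let t := 200*(PySem.List.pyGetD p (-1) 0 - (PySem.List.pyGetD p (-2) 0)^2)
  g ++ [t]

-- ===== PORT B =====
def grad_rosen_alt (p : List Int) : List Int :=
  let n : Int := p.length
  let g : List Int := List.replicate p.length 0
  (PySem.List.pyRange 0 (n-1) 1).foldl (fun g i =>
    let g := PySem.List.pySetD g i (PySem.List.pyGetD g i 0 + 2*(200*(PySem.List.pyGetD p i 0)^3 - 200*(PySem.List.pyGetD p i 0)*(PySem.List.pyGetD p (i+1) 0) + PySem.List.pyGetD p i 0 - 1))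
    PySem.List.pySetD g (i+1) (PySem.List.pyGetD g (i+1) 0 + 200*(PySem.List.pyGetD p (i+1) 0 - (PySem.List.pyGetD p i 0)^2))) g

-- ===== PRECONDITION & SPEC =====
-- Pre_ excludes exactly the inputs where A raises IndexError (it indexes p[1] and p[-2] unconditionally).
def Pre_grad_rosen (p : List Int) : Prop := 2 ≤ p.length
instance (p : List Int) : Decidable (Pre_grad_rosen p) := by unfold Pre_grad_rosen; infer_instance
def pvWitness_grad_rosen : List Int := [1, 2, 3]

-- A raises IndexError whenever len(p) < 2 (it indexes p[1] and p[-2] unconditionally); B returns [0]*len(p) there.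
def Raises_grad_rosen (p : List Int) : Prop := p.length < 2
instance (p : List Int) : Decidable (Raises_grad_rosen p) := by unfold Raises_grad_rosen; infer_instance
def pvRaiseWitness_grad_rosen : List Int := [3]
def pvRaiseWitnessOut_grad_rosen : List Int := [0]

def Spec_grad_rosen (p : List Int) (out : List Int) : Prop := out = grad_rosen_alt p
instance (p : List Int) (out : List Int) : Decidable (Spec_grad_rosen p out) := by unfold Spec_grad_rosen; infer_instance

-- ===== CLAIM (what is proved, stated in full; the proofs are below) =====
def Claim_equal_grad_rosen : Prop := ∀ (p : List Int), Dom_grad_rosen p → Pre_grad_rosen p → Spec_grad_rosen p (grad_rosen p)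
def Claim_raises_grad_rosen : Prop := (∀ (p : List Int), Dom_grad_rosen p → Raises_grad_rosen p → ¬ Pre_grad_rosen p) ∧ (Dom_grad_rosen (pvRaiseWitness_grad_rosen) ∧ Raises_grad_rosen (pvRaiseWitness_grad_rosen) ∧ grad_rosen_alt (pvRaiseWitness_grad_rosen) = pvRaiseWitnessOut_grad_rosen)

-- ===== LEMMAS AND PROOFS =====

def selfT (p : List Int) (v : Int) : Int :=
  2*(200*(PySem.List.pyGetD p v 0)^3 - 200*(PySem.List.pyGetD p v 0)*(PySem.List.pyGetD p (v+1) 0) + PySem.List.pyGetD p v 0 - 1)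
def coupT (p : List Int) (v : Int) : Int :=
  200*(PySem.List.pyGetD p (v+1) 0 - (PySem.List.pyGetD p v 0)^2)

theorem A_unfold (p : List Int) : grad_rosen p =
    (PySem.List.pyRange 1 ((p.length:Int)-1) 1).foldl
      (fun g v => g ++ [selfT p v + 200*(PySem.List.pyGetD p v 0 - (PySem.List.pyGetD p (v-1) 0)^2)])
      [selfT p 0] ++ [coupT p (-2)] := rfl

theorem A_shape (p : List Int) : grad_rosen p =
    [selfT p 0] ++ (PySem.List.pyRange 1 ((p.length:Int)-1) 1).map
      (fun v => selfT p v + 200*(PySem.List.pyGetD p v 0 - (PySem.List.pyGetD p (v-1) 0)^2))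
      ++ [coupT p (-2)] := by
  rw [A_unfold, PySem.List.foldl_append_singleton_eq_map]
def G (p : List Int) (k : Nat) : List Int :=
  (List.range p.length).map (fun j =>
    (if 0 < j ∧ j ≤ k then coupT p ((j:Int) - 1) else 0) + (if j < k then selfT p (j:Int) else 0))

theorem grad_rosen_A_eq (p : List Int) (h : 2 ≤ p.length) :
    grad_rosen p = G p (p.length - 1) := by
  rw [A_shape]
  apply List.ext_getElem
  · simp [G, PySem.List.length_pyRange_one]; omega
  · intro j hj hj2
    simp only [G, List.getElem_map, List.getElem_range]
    have hmid : (PySem.List.pyRange 1 ((p.length:Int)-1) 1).length = p.length - 2 := by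
      rw [PySem.List.length_pyRange_one]; omega
    rcases j with _ | k
    · simp only [List.singleton_append]
      rw [if_neg (by omega), if_pos (by omega)]
      simp
    · by_cases hk : k + 1 < p.length - 1
      · rw [List.getElem_append, dif_pos (by simp only [List.singleton_append, List.length_cons, List.length_map, hmid]; omega)]
        simp only [List.singleton_append, List.getElem_cons_succ, List.getElem_map,
          PySem.List.getElem_pyRange_one]
        rw [if_pos (by omega), if_pos (by omega)]
        have e1 : (1:Int) + (k:Int) = ((k+1 : Nat) : Int) := by push_cast; ring
        simp only [e1, coupT]
        have e2 : ((k+1 : Nat):Int) - 1 + 1 = ((k+1 : Nat):Int) := by ring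
        rw [e2]; ring
      · have hjl : k + 1 = p.length - 1 := by
          simp only [List.length_append, List.length_singleton, List.length_map, hmid] at hj; omega
        rw [List.getElem_append, dif_neg (by simp only [List.singleton_append, List.length_cons, List.length_map, hmid]; omega)]
        simp only [List.getElem_singleton]
        rw [if_pos (by omega), if_neg (by omega)]
        simp only [coupT]
        rw [show (-2 : Int) + 1 = -1 from by norm_num]
        rw [PySem.List.pyGetD_neg_ofNat p 1 0 (by omega) (by omega)]
        rw [PySem.List.pyGetD_neg_ofNat p 2 0 (by omega) (by omega)]
        rw [show ((k+1 : Nat):Int) - 1 + 1 = ((k+1 : Nat):Int) from by ring]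
        rw [show ((k+1 : Nat):Int) - 1 = ((k : Nat):Int) from by push_cast; ring]
        rw [PySem.List.pyGetD_natCast, PySem.List.pyGetD_natCast]
        rw [List.getD_eq_getElem _ _ (by omega), List.getD_eq_getElem _ _ (by omega)]
        simp only [show p.length - 1 = k + 1 from by omega, show p.length - 2 = k from by omega]
        ring
def stepB (p : List Int) (g : List Int) (i : Int) : List Int :=
  let g := PySem.List.pySetD g i (PySem.List.pyGetD g i 0 + 2*(200*(PySem.List.pyGetD p i 0)^3 - 200*(PySem.List.pyGetD p i 0)*(PySem.List.pyGetD p (i+1) 0) + PySem.List.pyGetD p i 0 - 1))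
  PySem.List.pySetD g (i+1) (PySem.List.pyGetD g (i+1) 0 + 200*(PySem.List.pyGetD p (i+1) 0 - (PySem.List.pyGetD p i 0)^2))

theorem B_unfold (p : List Int) : grad_rosen_alt p =
    (PySem.List.pyRange 0 ((p.length:Int)-1) 1).foldl (stepB p) (List.replicate p.length 0) := rfl

theorem G_length (p : List Int) (k : Nat) : (G p k).length = p.length := by
  simp [G]

theorem G_zero (p : List Int) : G p 0 = List.replicate p.length 0 := by
  refine List.eq_replicate_iff.mpr ⟨by simp [G], ?_⟩
  intro x hx
  simp only [G, List.mem_map, List.mem_range] at hx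
  obtain ⟨j, _, rfl⟩ := hx
  rw [if_neg (by omega), if_neg (by omega)]
  norm_num

theorem G_getElem (p : List Int) (k : Nat) (j : Nat) (hj : j < p.length) :
    (G p k)[j]'(by rw [G_length]; exact hj) =
      (if 0 < j ∧ j ≤ k then coupT p ((j:Int) - 1) else 0) + (if j < k then selfT p (j:Int) else 0) := by
  simp [G]

theorem B_step (p : List Int) (m : Nat) (h2 : 2 ≤ p.length) (hm : m + 1 ≤ p.length - 1) :
    stepB p (G p m) (m:Int) = G p (m+1) := by
  have hm0 : m < p.length := by omega
  have hm1 : m + 1 < p.length := by omega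
  unfold stepB
  rw [show ((m:Int)+1) = ((m+1:Nat):Int) from by push_cast; ring]
  simp only [PySem.List.pySetD_natCast, PySem.List.pyGetD_natCast]
  have hread1 : (G p m).getD m 0 = (if 0 < m ∧ m ≤ m then coupT p ((m:Int) - 1) else 0) := by
    rw [List.getD_eq_getElem (G p m) 0 (by rw [G_length]; omega), G_getElem p m m hm0,
        if_neg (show ¬ m < m from by omega), add_zero]
  have hread2 : ∀ v : Int, ((G p m).set m v).getD (m+1) 0 = 0 := by
    intro v
    rw [List.getD_eq_getElem _ 0 (by rw [List.length_set, G_length]; omega),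
        List.getElem_set_of_ne (by omega), G_getElem p m (m+1) hm1,
        if_neg (show ¬(0 < m+1 ∧ m+1 ≤ m) from by omega),
        if_neg (show ¬ m+1 < m from by omega), add_zero]
  rw [hread1, hread2]
  apply List.ext_getElem
  · simp [G_length]
  · intro j hj1 hj2
    have hjlen : j < p.length := by
      simpa [G_length] using hj2
    rw [G_getElem p (m+1) j hjlen]
    rw [List.getElem_set, List.getElem_set]
    by_cases hjd : j = m + 1
    · subst hjd
      rw [if_pos rfl, if_pos (show 0 < m+1 ∧ m+1 ≤ m+1 from by omega),
          if_neg (show ¬ m+1 < m+1 from by omega)]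
      simp only [coupT]
      rw [show ((m+1:Nat):Int) - 1 + 1 = ((m+1:Nat):Int) from by ring,
          show ((m+1:Nat):Int) - 1 = (m:Int) from by push_cast; ring,
          PySem.List.pyGetD_natCast, PySem.List.pyGetD_natCast]
      ring
    · rw [if_neg (show ¬ m+1 = j from by omega)]
      by_cases hjm : j = m
      · subst hjm
        rw [if_pos rfl]
        by_cases h0 : 0 < j
        · rw [if_pos (show 0 < j ∧ j ≤ j from by omega), if_pos (show 0 < j ∧ j ≤ j+1 from by omega), if_pos (show j < j+1 from by omega)]
          simp only [selfT]
          rw [show ((j:Int)+1) = ((j+1:Nat):Int) from by push_cast; ring,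
              PySem.List.pyGetD_natCast, PySem.List.pyGetD_natCast]
        · rw [if_neg (show ¬(0 < j ∧ j ≤ j) from by omega),
              if_neg (show ¬(0 < j ∧ j ≤ j+1) from by omega),
              if_pos (show j < j+1 from by omega)]
          simp only [selfT]
          rw [show ((j:Int)+1) = ((j+1:Nat):Int) from by push_cast; ring,
              PySem.List.pyGetD_natCast, PySem.List.pyGetD_natCast]
      · rw [if_neg (show ¬ m = j from by omega), G_getElem p m j hjlen]
        congr 1
        · exact if_congr (by omega) rfl rfl
        · exact if_congr (by omega) rfl rfl

theorem B_inv (p : List Int) (h2 : 2 ≤ p.length) :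
    ∀ m : Nat, m ≤ p.length - 1 →
      (PySem.List.pyRange 0 (m:Int) 1).foldl (stepB p) (List.replicate p.length 0) = G p m := by
  intro m
  induction m with
  | zero => intro _; rw [PySem.List.pyRange_one_eq_nil (by norm_num)]; simp [G_zero]
  | succ k ih =>
    intro hk
    rw [show ((k+1:Nat):Int) = (k:Int)+1 from by push_cast; ring]
    rw [PySem.List.pyRange_one_succ_right (by positivity)]
    rw [List.foldl_append, ih (by omega)]
    simp only [List.foldl_cons, List.foldl_nil]
    exact B_step p k h2 (by omega)

theorem grad_rosen_B_eq (p : List Int) (h : 2 ≤ p.length) :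
    grad_rosen_alt p = G p (p.length - 1) := by
  rw [B_unfold, show ((p.length:Int)-1) = ((p.length - 1 : Nat) : Int) from by omega]
  exact B_inv p h _ (by omega)

-- ===== VERDICT (by name: the statement is the Claim_ definition above) =====
theorem grad_rosen_spec : Claim_equal_grad_rosen := by
  intro p _ hpre
  unfold Spec_grad_rosen
  rw [grad_rosen_A_eq p hpre, grad_rosen_B_eq p hpre]

@[simp] theorem grad_rosen_raises : Claim_raises_grad_rosen := by
  unfold Claim_raises_grad_rosen
  constructor
  · intro p _ hr hpre; unfold Raises_grad_rosen at hr; unfold Pre_grad_rosen at hpre; omega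
  · exact ⟨by decide, by decide, by decide⟩
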